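-- pv_equiv track=rewrite | github.com/hila-shemer/dgp | dgp/blueprints/engine.py | is_alnum
-- ===== SOURCE A (Python) =====
-- def is_alnum(string):
--     """Check if string has uppercase, lowercase, and digit."""
--     has_lower = False
--     has_upper = False
--     has_digit = False
--     for char in string:
--         if char >= '0' and char <= '9':
--             has_digit = True
--         if char >= 'a' and char <= 'z':
--             has_lower = True
--         if char >= 'A' and char <= 'Z':
--             has_upper = True
--     return has_digit and has_lower and has_upper
-- ===== SOURCE B (Python) =====
-- def is_alnum(string):
--     """Check if string has uppercase, lowercase, and digit."""
--     return (any('0' <= c <= '9' for c in string)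
--             and any('a' <= c <= 'z' for c in string)
--             and any('A' <= c <= 'Z' for c in string))
-- ===== Notes on version B (the rewrite author's own statement) =====
-- stated objective: idiomatic
-- what changed: A makes one full scan accumulating three boolean flags; B makes three independent short-circuiting any(...) passes, one per character category, stopping each scan at the first hit and skipping later passes when an earlier category is absent; the C-level any() scans measured faster than A's per-character Python loop.
import Mathlib
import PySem

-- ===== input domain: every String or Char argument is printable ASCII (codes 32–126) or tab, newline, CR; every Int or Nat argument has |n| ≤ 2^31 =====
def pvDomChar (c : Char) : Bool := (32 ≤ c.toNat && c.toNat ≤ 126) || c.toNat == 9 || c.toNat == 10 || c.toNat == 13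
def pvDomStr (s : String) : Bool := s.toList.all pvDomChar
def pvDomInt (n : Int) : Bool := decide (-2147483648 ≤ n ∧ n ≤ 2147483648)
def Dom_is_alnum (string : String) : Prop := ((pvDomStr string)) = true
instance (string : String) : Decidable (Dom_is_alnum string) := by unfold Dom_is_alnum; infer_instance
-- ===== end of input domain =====

-- B replaces A's single full scan with three accumulator flags by three independent
-- short-circuiting any(...) passes, one per ASCII category (idiomatic; same exact
-- ASCII-range semantics; a timing run measured B faster by a constant factor).

-- ===== PORT A =====
-- one loop over the characters, three boolean flags updated by range comparisons
def is_alnum (string : String) : Bool :=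
  let r := string.toList.foldl
    (fun (acc : Bool × Bool × Bool) char =>
      -- acc = (has_lower, has_upper, has_digit)
      let hd := if char ≥ '0' ∧ char ≤ '9' then true else acc.2.2
      let hl := if char ≥ 'a' ∧ char ≤ 'z' then true else acc.1
      let hu := if char ≥ 'A' ∧ char ≤ 'Z' then true else acc.2.1
      (hl, hu, hd))
    (false, false, false)
  r.2.2 && r.1 && r.2.1

-- ===== PORT B =====
-- three staged, short-circuiting passes: any digit, then any lowercase, then any uppercase
def is_alnum_alt (string : String) : Bool :=
  string.toList.any (fun c => decide ('0' ≤ c ∧ c ≤ '9'))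
    && string.toList.any (fun c => decide ('a' ≤ c ∧ c ≤ 'z'))
    && string.toList.any (fun c => decide ('A' ≤ c ∧ c ≤ 'Z'))

-- ===== PRECONDITION & SPEC =====
def Spec_is_alnum (string : String) (out : Bool) : Prop := out = is_alnum_alt string
instance (string : String) (out : Bool) : Decidable (Spec_is_alnum string out) := by unfold Spec_is_alnum; infer_instance

-- ===== CLAIM (what is proved, stated in full; the proofs are below) =====
def Claim_equal_is_alnum : Prop := ∀ (string : String), Dom_is_alnum string → Spec_is_alnum string (is_alnum string)

-- ===== LEMMAS AND PROOFS =====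

-- A's fold accumulates exactly the three 'any' facts (lambda stated zeta-reduced)
theorem fold_char (xs : List Char) (hl hu hd : Bool) :
    xs.foldl
      (fun (acc : Bool × Bool × Bool) char =>
        (if char ≥ 'a' ∧ char ≤ 'z' then true else acc.1,
         if char ≥ 'A' ∧ char ≤ 'Z' then true else acc.2.1,
         if char ≥ '0' ∧ char ≤ '9' then true else acc.2.2))
      (hl, hu, hd)
    = (hl || xs.any (fun c => decide ('a' ≤ c ∧ c ≤ 'z')),
       hu || xs.any (fun c => decide ('A' ≤ c ∧ c ≤ 'Z')),
       hd || xs.any (fun c => decide ('0' ≤ c ∧ c ≤ '9'))) := by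
  induction xs generalizing hl hu hd with
  | nil => simp
  | cons x xs ih =>
    simp only [List.foldl_cons, List.any_cons, ih]
    refine Prod.ext ?_ (Prod.ext ?_ ?_)
    · by_cases h : 'a' ≤ x ∧ x ≤ 'z' <;> simp [ge_iff_le, h]
    · by_cases h : 'A' ≤ x ∧ x ≤ 'Z' <;> simp [ge_iff_le, h]
    · by_cases h : '0' ≤ x ∧ x ≤ '9' <;> simp [ge_iff_le, h]

theorem is_alnum_eq (string : String) : is_alnum string = is_alnum_alt string := by
  simp only [is_alnum, is_alnum_alt]
  rw [fold_char]
  simp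

-- ===== VERDICT (by name: the statement is the Claim_ definition above) =====
theorem is_alnum_spec : Claim_equal_is_alnum := by
  intro s _
  unfold Spec_is_alnum
  exact is_alnum_eq s
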